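-- pv_equiv track=rewrite | github.com/EnexaProject/enexa-tensor-reasoning | tnreason/engine/subscript_creation.py | get_colorDict
-- ===== SOURCE A (Python) =====
-- def get_colorDict(nestedColorsList, symbols):
--     colorDict = {}
--     i = 0
--     for colors in nestedColorsList:
--         for color in colors:
--             if color not in colorDict:
--                 if i >= len(symbols):
--                     raise ValueError("Length of Contraction is too large for Einsum!")
--                 colorDict[color] = symbols[i]
--                 i += 1
--     return colorDict
-- ===== SOURCE B (Python) =====
-- def get_colorDict(nestedColorsList, symbols):
--     flat = [color for colors in nestedColorsList for color in colors]
--     first = {}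
--     for pos, color in reversed(list(enumerate(flat))):
--         first[color] = pos
--     ordered = sorted(first, key=first.get)
--     if len(ordered) > len(symbols):
--         raise ValueError("Length of Contraction is too large for Einsum!")
--     return dict(zip(ordered, symbols))
-- ===== Notes on version B (the rewrite author's own statement) =====
-- stated objective: alternative
-- what changed: Replaced A's single fused dedup-and-assign pass by a sort-based pipeline: a backward overwrite scan over the enumerated flattened colors records each color's first-occurrence index, the colors are then sorted by that index and zipped with the symbols (same ValueError check).
import Mathlib
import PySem

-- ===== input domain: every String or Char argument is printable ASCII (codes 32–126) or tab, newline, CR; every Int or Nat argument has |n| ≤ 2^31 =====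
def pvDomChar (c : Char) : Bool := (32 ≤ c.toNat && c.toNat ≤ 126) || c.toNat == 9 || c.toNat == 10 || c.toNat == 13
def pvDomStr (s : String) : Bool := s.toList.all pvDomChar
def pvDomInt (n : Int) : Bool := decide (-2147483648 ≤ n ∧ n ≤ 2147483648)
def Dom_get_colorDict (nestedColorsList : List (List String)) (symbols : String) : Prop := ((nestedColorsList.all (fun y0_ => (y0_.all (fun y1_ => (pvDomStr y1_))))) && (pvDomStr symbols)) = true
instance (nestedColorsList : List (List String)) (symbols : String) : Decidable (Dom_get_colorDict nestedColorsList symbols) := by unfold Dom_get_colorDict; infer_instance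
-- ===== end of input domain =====

-- B replaces A's fused ordered dedup-and-assign pass by: a BACKWARD overwrite scan recording each
-- color's first-occurrence index, a SORT of the colors by that index, then a zip with the symbols
-- (same ValueError when there are more distinct colors than symbols).

-- ===== PORT A =====
-- A: fused loop over the nested lists, assigning symbols[i] to each fresh color inline; the raise branch keeps the state (excluded by Pre_).
def get_colorDict (nestedColorsList : List (List String)) (symbols : String) : List (String × String) :=
  (nestedColorsList.foldl
    (fun (st : PySem.Dict String String × Int) colors =>
      colors.foldl
        (fun (st : PySem.Dict String String × Int) color =>
          if st.1.contains color then st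
          else
            match PySem.Str.pyGet? symbols st.2 with
            | none => st          -- Python raises ValueError here; such inputs are outside Pre_
            | some c => (st.1.insert color (String.ofList [c]), st.2 + 1))
        st)
    ((PySem.Dict.mk []), (0 : Int))).1.items

-- ===== PORT B =====
-- B: backward scan over the enumerated flattened list overwrites first[color] down to the first
-- occurrence; sort the colors by that index; then dict(zip(ordered, symbols)).
def get_colorDict_alt (nestedColorsList : List (List String)) (symbols : String) : List (String × String) :=
  let flat := nestedColorsList.flatMap (fun colors => colors)
  let first := ((PySem.List.enumerate flat).reverse).foldl
      (fun (d : PySem.Dict String Int) p => d.insert p.2 p.1) PySem.Dict.empty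
  let ordered := PySem.List.sorted first.keys (fun c => first.getD c 0) false
  if symbols.toList.length < ordered.length then []  -- Python raises ValueError here; such inputs are outside Pre_
  else (PySem.Dict.ofList (ordered.zip (symbols.toList.map (fun c => String.ofList [c])))).items

-- ===== PRECONDITION & SPEC =====
-- Pre_ excludes exactly the inputs on which A (and B) raise ValueError: more distinct colors than symbols.
def Pre_get_colorDict (nestedColorsList : List (List String)) (symbols : String) : Prop :=
  (PySem.List.dedup (nestedColorsList.flatMap (fun colors => colors))).length ≤ symbols.toList.length

instance (nestedColorsList : List (List String)) (symbols : String) : Decidable (Pre_get_colorDict nestedColorsList symbols) := by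
  unfold Pre_get_colorDict; infer_instance

def pvWitness_get_colorDict : List (List String) × String := ([["red", "blue"], ["blue", "green"]], "abc")

def Spec_get_colorDict (nestedColorsList : List (List String)) (symbols : String) (out : List (String × String)) : Prop :=
  out = get_colorDict_alt nestedColorsList symbols

instance (nestedColorsList : List (List String)) (symbols : String) (out : List (String × String)) : Decidable (Spec_get_colorDict nestedColorsList symbols out) := by
  unfold Spec_get_colorDict; infer_instance

-- ===== CLAIM (what is proved, stated in full; the proofs are below) =====
def Claim_equal_get_colorDict : Prop := ∀ (nestedColorsList : List (List String)) (symbols : String), Dom_get_colorDict nestedColorsList symbols → Pre_get_colorDict nestedColorsList symbols → Spec_get_colorDict nestedColorsList symbols (get_colorDict nestedColorsList symbols)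

-- ===== LEMMAS AND PROOFS =====

-- ---- A-side: the fused loop produces the ordered dedup zipped with the symbol characters ----

-- appending one element to the left list of a zip, when the right list is long enough
theorem pv_zip_append_singleton {α β : Type} (us : List α) (cs : List β) (x : α)
    (h : us.length < cs.length) :
    (us ++ [x]).zip cs = us.zip cs ++ [(x, cs[us.length])] := by
  induction us generalizing cs with
  | nil =>
    cases cs with
    | nil => simp at h
    | cons c cs => simp
  | cons u us ih =>
    cases cs with
    | nil => simp at h
    | cons c cs =>
      simp only [List.cons_append, List.zip_cons_cons, List.length_cons]
      rw [ih cs (by simpa using h)]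
      simp

-- the loop invariant for A's inner step: starting from the dict pairing us with the
-- first symbols and counter us.length, folding xs extends us to Set.update us xs.
theorem pv_loop_inv (symbols : String) (xs : List String) :
    ∀ (us : List String), us.Nodup →
    (PySem.Set.update us xs).length ≤ symbols.toList.length →
    xs.foldl
      (fun (st : PySem.Dict String String × Int) color =>
        if st.1.contains color then st
        else
          match PySem.Str.pyGet? symbols st.2 with
          | none => st
          | some c => (st.1.insert color (String.ofList [c]), st.2 + 1))
      ((PySem.Dict.mk (us.zip (symbols.toList.map (fun c => String.ofList [c])))), (us.length : Int))
    = ((PySem.Dict.mk ((PySem.Set.update us xs).zip (symbols.toList.map (fun c => String.ofList [c])))),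
       ((PySem.Set.update us xs).length : Int)) := by
  induction xs with
  | nil => intro us _ _; simp [PySem.Set.update]
  | cons x xs ih =>
    intro us hnd hlen
    have husle : us.length ≤ (PySem.Set.update us (x :: xs)).length := by
      rw [PySem.Set.update_eq_append_filter]; simp
    have huslen : us.length ≤ symbols.toList.length := le_trans husle hlen
    have hkeys : (PySem.Dict.mk (us.zip (symbols.toList.map (fun c => String.ofList [c])))).keys = us := by
      simp only [PySem.Dict.keys_mk]
      exact List.map_fst_zip (by simpa using huslen)
    rw [List.foldl_cons]
    by_cases hx : x ∈ us
    · have hc : (PySem.Dict.mk (us.zip (symbols.toList.map (fun c => String.ofList [c])))).contains x = true := by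
        rw [PySem.Dict.contains_iff_mem_keys, hkeys]; exact hx
      rw [PySem.Set.update_cons, PySem.Set.add_of_mem hx] at hlen ⊢
      simp only [hc, if_true]
      exact ih us hnd hlen
    · have hc : (PySem.Dict.mk (us.zip (symbols.toList.map (fun c => String.ofList [c])))).contains x = false := by
        rw [Bool.eq_false_iff]
        intro hco
        rw [PySem.Dict.contains_iff_mem_keys, hkeys] at hco
        exact hx hco
      rw [PySem.Set.update_cons, PySem.Set.add_of_not_mem hx] at hlen ⊢
      have hlt : us.length < symbols.toList.length := by
        have : (us ++ [x]).length ≤ (PySem.Set.update (us ++ [x]) xs).length := by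
          rw [PySem.Set.update_eq_append_filter]; simp
        have := le_trans this hlen
        simpa using this
      have hget : PySem.Str.pyGet? symbols ((us.length : Int)) = some (symbols.toList[us.length]'hlt) := by
        simp [List.getElem?_eq_getElem hlt]
      simp only [hc, Bool.false_eq_true, if_false, hget]
      have hins :
          (PySem.Dict.mk (us.zip (symbols.toList.map (fun c => String.ofList [c])))).insert x
              (String.ofList [symbols.toList[us.length]'hlt])
          = PySem.Dict.mk ((us ++ [x]).zip (symbols.toList.map (fun c => String.ofList [c]))) := by
        apply PySem.Dict.ext
        rw [PySem.Dict.items_insert]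
        simp only [hc, Bool.false_eq_true, if_false]
        have hmaplen : us.length < (symbols.toList.map (fun c => String.ofList [c])).length := by
          simpa using hlt
        rw [pv_zip_append_singleton us _ x hmaplen]
        simp
      rw [hins]
      have : ((us.length : Int) + 1) = ((us ++ [x]).length : Int) := by simp
      rw [this]
      have hnd' : (us ++ [x]).Nodup := by
        simp [List.nodup_append, hnd]
        intro a ha h
        exact hx (h ▸ ha)
      exact ih (us ++ [x]) hnd' hlen

-- ---- B-side: the backward-scan dict, then the sort ----

-- the dict built by B's backward loop over xs enumerated from s (rightmost pair inserted first)
def pvFirst (xs : List String) (s : Int) : PySem.Dict String Int :=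
  (PySem.List.enumerate xs s).foldr (fun p d => d.insert p.2 p.1) PySem.Dict.empty

theorem pvFirst_cons (x : String) (xs : List String) (s : Int) :
    pvFirst (x :: xs) s = (pvFirst xs (s + 1)).insert x s := by
  simp [pvFirst, PySem.List.enumerate_cons]

theorem pvFirst_mem_keys (xs : List String) (s : Int) (c : String) :
    c ∈ (pvFirst xs s).keys ↔ c ∈ xs := by
  induction xs generalizing s with
  | nil => simp [pvFirst, PySem.List.enumerate_nil]
  | cons x xs ih =>
    rw [pvFirst_cons]
    simp [PySem.Dict.mem_keys_insert, ih]

theorem pvFirst_nodup_keys (xs : List String) (s : Int) : (pvFirst xs s).keys.Nodup := by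
  induction xs generalizing s with
  | nil =>
    have : pvFirst ([] : List String) s = PySem.Dict.empty := by
      simp [pvFirst, PySem.List.enumerate_nil]
    rw [this]
    exact PySem.Dict.nodup_keys_empty
  | cons x xs ih =>
    rw [pvFirst_cons]
    exact PySem.Dict.nodup_keys_insert _ _ _ (ih (s + 1))

theorem pvFirst_getD_lb (xs : List String) (s : Int) (c : String) (hc : c ∈ xs) :
    s ≤ (pvFirst xs s).getD c 0 := by
  induction xs generalizing s with
  | nil => simp at hc
  | cons x xs ih =>
    rw [pvFirst_cons, PySem.Dict.getD_insert]
    by_cases h : c = x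
    · simp [h]
    · simp only [h, if_false]
      have : c ∈ xs := by rcases List.mem_cons.mp hc with h' | h'; exact absurd h' h; exact h'
      have := ih (s + 1) this
      omega

-- the colors' first-occurrence indices strictly increase along the ordered dedup
theorem pvFirst_pairwise (xs : List String) (s : Int) :
    (PySem.List.dedup xs).Pairwise
      (fun a b => (pvFirst xs s).getD a 0 < (pvFirst xs s).getD b 0) := by
  induction xs generalizing s with
  | nil => simp
  | cons x xs ih =>
    rw [PySem.List.dedup_eq_ofList, PySem.Set.ofList_cons, List.pairwise_cons]
    constructor
    · intro b hb
      have hbx : b ≠ x := ((PySem.Set.mem_discard _ _ _).mp hb).2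
      have hbxs : b ∈ xs := by
        have := ((PySem.Set.mem_discard _ _ _).mp hb).1
        simpa [PySem.Set.mem_ofList] using this
      rw [pvFirst_cons, PySem.Dict.getD_insert, PySem.Dict.getD_insert,
        if_pos rfl, if_neg hbx]
      have := pvFirst_getD_lb xs (s + 1) b hbxs
      omega
    · have hsub : List.Sublist (PySem.Set.discard (PySem.Set.ofList xs) x) (PySem.Set.ofList xs) :=
        List.filter_sublist
      have hp := (ih (s + 1)).sublist (by simpa [PySem.List.dedup_eq_ofList] using hsub)
      refine List.Pairwise.imp_of_mem ?_ hp
      intro a b ha hb hab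
      have hax : a ≠ x := ((PySem.Set.mem_discard _ _ _).mp ha).2
      have hbx : b ≠ x := ((PySem.Set.mem_discard _ _ _).mp hb).2
      rw [pvFirst_cons, PySem.Dict.getD_insert, PySem.Dict.getD_insert,
        if_neg hax, if_neg hbx]
      exact hab

-- B's sorted key list IS the ordered dedup of the flattened colors
theorem pv_sorted_eq_dedup (flat : List String) :
    PySem.List.sorted (pvFirst flat 0).keys (fun c => (pvFirst flat 0).getD c 0) false
      = PySem.List.dedup flat := by
  apply PySem.List.sorted_eq_of_perm_of_pairwise_lt
  · exact (List.perm_ext_iff_of_nodup (PySem.List.nodup_dedup flat) (pvFirst_nodup_keys flat 0)).mpr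
      (fun a => by rw [PySem.List.mem_dedup, pvFirst_mem_keys])
  · exact pvFirst_pairwise flat 0

-- ===== VERDICT (by name: the statement is the Claim_ definition above) =====
theorem get_colorDict_spec : Claim_equal_get_colorDict := by
  intro ncl symbols _ hpre
  unfold Spec_get_colorDict get_colorDict get_colorDict_alt
  unfold Pre_get_colorDict at hpre
  have hflat : ncl.flatMap (fun colors => colors) = ncl.flatten := by simp
  rw [hflat] at hpre ⊢
  -- B's backward loop is pvFirst
  have hfold : ((PySem.List.enumerate ncl.flatten).reverse).foldl
      (fun (d : PySem.Dict String Int) p => d.insert p.2 p.1) PySem.Dict.empty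
      = pvFirst ncl.flatten 0 := by
    rw [List.foldl_reverse]; rfl
  simp only [hfold, pv_sorted_eq_dedup]
  -- A's fused loop result
  rw [← List.foldl_flatten]
  have h0 : (PySem.Set.update ([] : List String) ncl.flatten).length ≤ symbols.toList.length := by
    rw [PySem.Set.update_nil_left]
    simpa [PySem.List.dedup_eq_ofList] using hpre
  have hinv := pv_loop_inv symbols ncl.flatten [] List.nodup_nil h0
  simp only [List.zip_nil_left, List.length_nil, Nat.cast_zero] at hinv
  rw [hinv]
  rw [PySem.Set.update_nil_left] at h0 ⊢
  have hnotlt : ¬ symbols.toList.length < (PySem.Set.ofList ncl.flatten).length := Nat.not_lt.mpr h0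
  rw [if_neg (by simpa [PySem.List.dedup_eq_ofList] using hnotlt)]
  -- dict(zip(ordered, symbols)) over nodup fresh keys: items = the zip itself
  set pairs := (PySem.List.dedup ncl.flatten).zip (symbols.toList.map (fun c => String.ofList [c])) with hpairs
  have hfst : pairs.map (·.1) = PySem.List.dedup ncl.flatten := by
    rw [hpairs]
    exact List.map_fst_zip (by simpa using h0)
  have : PySem.Dict.ofList pairs
      = pairs.foldl (fun d (p : String × String) => d.insert p.1 p.2) PySem.Dict.empty := rfl
  rw [this]
  have hitems := PySem.Dict.items_foldl_insert_fresh (l := pairs) (k := (·.1)) (v := (·.2))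
      (d := PySem.Dict.empty)
      (by intro a _; exact PySem.Dict.contains_empty _)
      (by rw [hfst]; exact PySem.List.nodup_dedup _)
  simpa [PySem.Dict.empty] using hitems.symm
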